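-- pv_equiv track=rewrite | github.com/jgfranco/formation | 2023_11/matrixSpeedDrill3.py | solution
-- ===== SOURCE A (Python) =====
-- def solution(m):
--
--     max = -1
--     maxSum = 0
--
--     for row in range(len(m)):
--         sum = 0
--         for col in range(len(m[0])):
--             sum += m[row][col]
--
--         if sum > 0 and sum > maxSum:
--             max = row
--             maxSum = sum
--
--     if maxSum == 0: return -1
--     return max +1
-- ===== SOURCE B (Python) =====
-- def solution(m):
--     if not m:
--         return -1
--     sums = [0] * len(m)
--     for c in range(len(m[0])):
--         sums = [s + row[c] for s, row in zip(sums, m)]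
--     best = max(sums)
--     return sums.index(best) + 1 if best > 0 else -1
-- ===== Notes on version B (the rewrite author's own statement) =====
-- stated objective: alternative
-- what changed: B transposes the traversal: instead of A's row-by-row loop that accumulates a running best index/best sum, B sweeps column-by-column, vectorially adding each column into a list of partial row sums, then selects with two library passes (max of the values, then .index of that value).
import Mathlib
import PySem

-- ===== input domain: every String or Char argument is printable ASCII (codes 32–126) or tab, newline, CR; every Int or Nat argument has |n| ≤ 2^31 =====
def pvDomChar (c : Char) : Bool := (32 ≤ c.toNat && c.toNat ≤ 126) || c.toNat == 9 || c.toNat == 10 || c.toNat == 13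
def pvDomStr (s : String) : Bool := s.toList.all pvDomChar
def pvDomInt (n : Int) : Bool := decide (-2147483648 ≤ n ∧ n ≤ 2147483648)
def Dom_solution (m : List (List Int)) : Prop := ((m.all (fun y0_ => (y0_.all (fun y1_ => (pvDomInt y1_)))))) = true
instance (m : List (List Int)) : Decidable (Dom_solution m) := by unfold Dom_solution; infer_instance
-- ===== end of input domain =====

-- B transposes the traversal (column-by-column vector accumulation of row sums, then max + .index selection); objective: alternative, same cost.

-- ===== PORT A =====
-- fused row-major loop: running (best row index, best positive sum); m[row][col] via pyGetD (in range under Pre_)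
def solution (m : List (List Int)) : Int :=
  let st := (PySem.List.pyRange 0 (m.length : Int)).foldl
    (fun (st : Int × Int) row =>
      let s := (PySem.List.pyRange 0 ((PySem.List.pyGetD m 0 []).length : Int)).foldl
        (fun acc col => acc + PySem.List.pyGetD (PySem.List.pyGetD m row []) col 0) 0
      if s > 0 ∧ s > st.2 then (row, s) else st)
    ((-1 : Int), (0 : Int))
  if st.2 = 0 then -1 else st.1 + 1

-- ===== PORT B =====
def solution_alt (m : List (List Int)) : Int :=
  if m = [] then -1
  else
    let sums := (PySem.List.pyRange 0 ((PySem.List.pyGetD m 0 []).length : Int)).foldl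
      (fun sums c => List.zipWith (fun s row => s + PySem.List.pyGetD row c 0) sums m)
      (List.replicate m.length (0 : Int))
    match PySem.List.max? sums (fun x => x) with
    | none => -1  -- unreachable: sums is nonempty since m ≠ []
    | some best =>
      if best > 0 then
        match PySem.List.index? sums best with
        | some i => (i : Int) + 1
        | none => -1  -- unreachable: best ∈ sums
      else -1

-- ===== PRECONDITION & SPEC =====
-- Pre_ excludes ragged matrices having a row shorter than row 0: there Python A (and Python B) raise IndexError.
def Pre_solution (m : List (List Int)) : Prop := ∀ row ∈ m, (m.headD []).length ≤ row.length
instance (m : List (List Int)) : Decidable (Pre_solution m) := by unfold Pre_solution; infer_instance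
def pvWitness_solution : List (List Int) := [[1, 2], [3, -4]]
def Spec_solution (m : List (List Int)) (out : Int) : Prop := out = solution_alt m
instance (m : List (List Int)) (out : Int) : Decidable (Spec_solution m out) := by unfold Spec_solution; infer_instance

-- ===== CLAIM (what is proved, stated in full; the proofs are below) =====
def Claim_equal_solution : Prop := ∀ (m : List (List Int)), Dom_solution m → Pre_solution m → Spec_solution m (solution m)

-- ===== LEMMAS AND PROOFS =====

-- the per-row sum over columns 0..w-1, the common value both programs aggregate
def pvRowSum (w : Int) (row : List Int) : Int :=
  ((PySem.List.pyRange 0 w).map (fun c => PySem.List.pyGetD row c 0)).sum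

-- B's column-major accumulation equals the row-major sums table
theorem pv_colfold (m : List (List Int)) (cs : List Int) (g : List Int → Int) :
    cs.foldl (fun sums c => List.zipWith (fun s row => s + PySem.List.pyGetD row c 0) sums m)
      (m.map g)
    = m.map (fun row => g row + (cs.map (fun c => PySem.List.pyGetD row c 0)).sum) := by
  induction cs generalizing g with
  | nil => simp
  | cons c t ih =>
    simp only [List.foldl_cons]
    have hz : ∀ (l : List (List Int)),
        List.zipWith (fun s row => s + PySem.List.pyGetD row c 0) (l.map g) l
        = l.map (fun row => g row + PySem.List.pyGetD row c 0) := by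
      intro l
      induction l with
      | nil => rfl
      | cons r l ihl => simp [ihl]
    rw [hz m, ih (fun row => g row + PySem.List.pyGetD row c 0)]
    apply List.map_congr_left
    intro row _
    simp [add_assoc]

-- a fold over range(len(T)) reading T[i] is a fold over T with its index
theorem pv_bridge {σ α : Type} (f : σ → Int → α → σ) (G : Int → α) :
    ∀ (T : List α) (a : Nat) (init : σ),
      (∀ k : Nat, (hk : k < T.length) → G (((a + k : Nat)) : Int) = T[k]) →
      (PySem.List.pyRange (a : Int) ((a + T.length : Nat) : Int)).foldl
          (fun st i => f st i (G i)) init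
      = (T.zipIdx a).foldl (fun st p => f st ((p.2 : Int)) p.1) init := by
  intro T
  induction T with
  | nil => intro a init _; simp [PySem.List.pyRange]
  | cons x t ih =>
    intro a init hG
    have h1 : (a : Int) < ((a + (x :: t).length : Nat) : Int) := by
      simp only [List.length_cons]; push_cast; omega
    rw [PySem.List.pyRange_one_cons h1]
    simp only [List.foldl_cons, List.zipIdx_cons]
    have hx : G (a : Int) = x := by
      have := hG 0 (by simp)
      simpa using this
    rw [hx]
    have e2 : ((a + (x :: t).length : Nat) : Int) = (((a + 1) + t.length : Nat) : Int) := by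
      simp only [List.length_cons]; push_cast; ring
    have e1 : ((a : Int) + 1) = (((a + 1 : Nat)) : Int) := by push_cast; ring
    rw [e2, e1]
    exact ih (a + 1) (f init (a : Int) x) (by
      intro k hk
      have := hG (k + 1) (by simpa using Nat.succ_lt_succ hk)
      have e3 : ((a + (k + 1) : Nat) : Int) = (((a + 1) + k : Nat) : Int) := by push_cast; ring
      rw [e3] at this
      simpa using this)

-- A's fused loop over (value, index) pairs computes (first index of the max, the max with floor st.2)
theorem pv_char (s : List Int) :
    ∀ (j : Nat) (st : Int × Int), 0 ≤ st.2 →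
      (s.zipIdx j).foldl
          (fun st p => if p.1 > 0 ∧ p.1 > st.2 then ((p.2 : Int), p.1) else st) st
      = (if s.foldl max st.2 ≤ st.2 then st.1
           else (j : Int) + (List.idxOf (s.foldl max st.2) s : Int),
         s.foldl max st.2) := by
  induction s with
  | nil => intro j st h; simp
  | cons v t ih =>
    intro j st h2
    rw [List.zipIdx_cons]
    simp only [List.foldl_cons]
    by_cases hv : st.2 < v
    · have hstep : (if v > 0 ∧ v > st.2 then ((j : Int), v) else st) = ((j : Int), v) := by
        rw [if_pos ⟨by omega, hv⟩]
      have hmaxv : max st.2 v = v := max_eq_right hv.le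
      rw [hstep, ih (j + 1) ((j : Int), v) (by simp; omega)]
      have hvM : v ≤ t.foldl max v := (PySem.List.le_foldl_max t v).1
      simp only [hmaxv]
      by_cases hMv : t.foldl max v ≤ v
      · have hM : t.foldl max v = v := le_antisymm hMv hvM
        rw [if_pos hMv, if_neg (by omega)]
        simp [hM, List.idxOf_cons_self]
      · rw [if_neg hMv, if_neg (by omega)]
        have hne : (v == t.foldl max v) = false := by
          simp only [beq_eq_false_iff_ne, ne_eq]; omega
        rw [List.idxOf_cons, hne]
        simp only [cond_false, Prod.mk.injEq]
        exact ⟨by push_cast; ring, trivial⟩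
    · have hstep : (if v > 0 ∧ v > st.2 then ((j : Int), v) else st) = st := by
        rw [if_neg (by omega)]
      have hmaxv : max st.2 v = st.2 := max_eq_left (by omega)
      rw [hstep, ih (j + 1) st h2]
      simp only [hmaxv]
      by_cases hM : t.foldl max st.2 ≤ st.2
      · rw [if_pos hM, if_pos hM]
      · rw [if_neg hM, if_neg hM]
        have hne : (v == t.foldl max st.2) = false := by
          simp only [beq_eq_false_iff_ne, ne_eq]; omega
        rw [List.idxOf_cons, hne]
        simp only [cond_false, Prod.mk.injEq]
        exact ⟨by push_cast; ring, trivial⟩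

-- shifting the seed of a running max out of the fold
theorem pv_foldl_max (t : List Int) (a b : Int) :
    t.foldl max (max a b) = max a (t.foldl max b) := by
  induction t generalizing b with
  | nil => simp
  | cons c t ih => simp only [List.foldl_cons, max_assoc, ih]

-- Python list.index on a present element is idxOf
theorem pv_index?_of_mem {xs : List Int} {v : Int} (h : v ∈ xs) :
    PySem.List.index? xs v = some (List.idxOf v xs) := by
  simp only [PySem.List.index?]
  induction xs with
  | nil => cases h
  | cons x t ih =>
    by_cases hx : x = v
    · subst hx
      simp [List.idxOf?_cons]
    · have hne : (x == v) = false := by simpa using hx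
      have hmem : v ∈ t := by
        cases h with
        | head => exact absurd rfl hx
        | tail _ h' => exact h'
      simp [List.idxOf?_cons, List.idxOf_cons, hne, ih hmem]

-- the inner column loop of A is pvRowSum
theorem pv_inner (m : List (List Int)) (w : Int) (row : Int) :
    (PySem.List.pyRange 0 w).foldl
        (fun acc col => acc + PySem.List.pyGetD (PySem.List.pyGetD m row []) col 0) 0
    = pvRowSum w (PySem.List.pyGetD m row []) := by
  rw [PySem.List.foldl_add]
  simp [pvRowSum]

-- ===== VERDICT (by name: the statement is the Claim_ definition above) =====
theorem solution_spec : Claim_equal_solution := by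
  intro m _ _
  unfold Spec_solution solution solution_alt
  by_cases hm : m = []
  · subst hm; decide
  · rw [if_neg hm]
    set w : Int := ((PySem.List.pyGetD m 0 []).length : Int) with hw
    -- B's sums table
    have hsums : (PySem.List.pyRange 0 w).foldl
        (fun sums c => List.zipWith (fun s row => s + PySem.List.pyGetD row c 0) sums m)
        (List.replicate m.length (0 : Int)) = m.map (pvRowSum w) := by
      have hrep : List.replicate m.length (0 : Int) = m.map (fun _ => 0) := by simp
      rw [hrep, pv_colfold m _ (fun _ => 0)]
      simp [pvRowSum]
    rw [hsums]
    set S := m.map (pvRowSum w) with hS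
    -- A's fold: rewrite the inner sum, then bridge to a fold over S with indices
    have hA1 : (PySem.List.pyRange 0 (m.length : Int)).foldl
        (fun (st : Int × Int) row =>
          let s := (PySem.List.pyRange 0 w).foldl
            (fun acc col => acc + PySem.List.pyGetD (PySem.List.pyGetD m row []) col 0) 0
          if s > 0 ∧ s > st.2 then (row, s) else st) ((-1 : Int), (0 : Int))
        = (PySem.List.pyRange 0 (m.length : Int)).foldl
        (fun (st : Int × Int) i =>
          if pvRowSum w (PySem.List.pyGetD m i []) > 0 ∧
             pvRowSum w (PySem.List.pyGetD m i []) > st.2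
          then (i, pvRowSum w (PySem.List.pyGetD m i [])) else st) ((-1 : Int), (0 : Int)) := by
      apply PySem.List.foldl_congr_mem
      intro acc x _
      simp only [pv_inner]
    have hG : ∀ k : Nat, (hk : k < S.length) →
        pvRowSum w (PySem.List.pyGetD m (((0 + k : Nat)) : Int) []) = S[k] := by
      intro k hk
      have hk' : k < m.length := by simpa [hS] using hk
      simp [hS, PySem.List.pyGetD_natCast, List.getD_eq_getElem?_getD, hk']
    have hbr := pv_bridge
      (fun (st : Int × Int) (i : Int) (x : Int) => if x > 0 ∧ x > st.2 then (i, x) else st)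
      (fun i => pvRowSum w (PySem.List.pyGetD m i [])) S 0 ((-1 : Int), (0 : Int)) hG
    have hlen : ((0 + S.length : Nat) : Int) = (m.length : Int) := by simp [hS]
    rw [hlen] at hbr
    simp only [Nat.cast_zero] at hbr
    -- case split on S = x :: t (S nonempty since m is)
    have hSne : S ≠ [] := by simp [hS, hm]
    obtain ⟨x, t, hxt⟩ := List.exists_cons_of_ne_nil hSne
    simp only [hA1, hbr]
    rw [pv_char S 0 ((-1 : Int), (0 : Int)) (by norm_num)]
    set M1 := t.foldl max x with hM1
    simp only [hxt, List.foldl_cons, pv_foldl_max, PySem.List.max?_id_cons, ← hM1,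
      Nat.cast_zero]
    by_cases hpos : 0 < M1
    · have h1 : max (0 : Int) M1 = M1 := max_eq_right hpos.le
      have hmem : M1 ∈ x :: t := by
        rcases PySem.List.foldl_max_mem t x with h | h
        · rw [hM1, h]; exact List.mem_cons_self
        · exact List.mem_cons_of_mem _ h
      have hidx := pv_index?_of_mem hmem
      simp only [h1]
      rw [if_neg (show ¬ (M1 ≤ (0 : Int)) by omega), if_neg (show ¬ (M1 = 0) by omega),
        if_pos (show M1 > 0 from hpos)]
      simp only [hidx]
      omega
    · have h1 : max (0 : Int) M1 = 0 := max_eq_left (by omega)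
      simp only [h1]
      simp [hpos]
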